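-- pv_equiv track=rewrite | github.com/student079/Algorithm | 프로그래머스/3/70130. 스타 수열/스타 수열.py | solution
-- ===== SOURCE A (Python) =====
-- from collections import Counter
--
-- def solution(a):
--     answer = -1
--     counter = Counter(a)
--
--     for i in counter.keys():
--         if counter[i] * 2 <= answer :
--             continue
--
--         cnt = 0
--         idx = 0
--         while idx + 1 < len(a):
--
--             if a[idx] != a[idx+1] and (a[idx] == i or a[idx+1] == i):
--                 cnt += 2
--                 idx+=1
--             idx += 1
--         answer = max(cnt, answer)
--
--
--     return answer
-- ===== SOURCE B (Python) =====
-- from collections import Counter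
--
-- def solution(a):
--     answer = -1
--     counter = Counter(a)
--     n = len(a)
--     for i in counter.keys():
--         if counter[i] * 2 <= answer:
--             continue
--         # dp over suffixes, right-to-left: dp1 = dp[idx+1], dp2 = dp[idx+2]
--         dp1 = 0
--         dp2 = 0
--         for idx in range(n - 2, -1, -1):
--             if a[idx] != a[idx + 1] and (a[idx] == i or a[idx + 1] == i):
--                 cur = max(dp1, 2 + dp2)
--             else:
--                 cur = dp1
--             dp1, dp2 = cur, dp1
--         answer = max(dp1, answer)
--     return answer
-- ===== Notes on version B (the rewrite author's own statement) =====
-- stated objective: alternative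
-- what changed: The greedy left-to-right matching scan inside each candidate loop is replaced by a right-to-left dynamic program over suffixes (rolling dp[idx]=max(dp[idx+1], 2+dp[idx+2] if the adjacent pair qualifies)), proved to compute the same maximum count of disjoint qualifying pairs.
import Mathlib
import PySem

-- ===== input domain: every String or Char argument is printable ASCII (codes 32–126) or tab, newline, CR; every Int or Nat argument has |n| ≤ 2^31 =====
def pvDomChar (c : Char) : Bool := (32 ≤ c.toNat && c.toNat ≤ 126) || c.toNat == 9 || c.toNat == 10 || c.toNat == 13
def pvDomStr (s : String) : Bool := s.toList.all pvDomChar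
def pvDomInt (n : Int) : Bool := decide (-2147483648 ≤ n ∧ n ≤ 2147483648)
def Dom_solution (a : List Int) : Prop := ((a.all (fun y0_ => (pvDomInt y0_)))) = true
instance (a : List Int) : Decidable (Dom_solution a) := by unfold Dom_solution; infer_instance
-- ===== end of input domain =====

-- B replaces A's greedy inner scan by a right-to-left suffix DP; same asymptotic cost (objective: alternative).

-- ===== PORT A =====
-- A's inner while loop: idx walks left to right, greedily taking qualifying adjacent pairs.
def aLoop (a : List Int) (i : Int) (idx : Nat) (cnt : Int) : Int :=
  if idx + 1 < a.length then
    if PySem.List.pyGetD a idx 0 ≠ PySem.List.pyGetD a (idx + 1 : Nat) 0 ∧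
       (PySem.List.pyGetD a idx 0 = i ∨ PySem.List.pyGetD a (idx + 1 : Nat) 0 = i) then
      aLoop a i (idx + 2) (cnt + 2)
    else
      aLoop a i (idx + 1) cnt
  else cnt
termination_by a.length - idx

def solution (a : List Int) : Int :=
  let counter := PySem.Dict.counter a
  counter.keys.foldl
    (fun answer i =>
      if counter.getD i 0 * 2 ≤ answer then answer
      else max (aLoop a i 0 0) answer)
    (-1)

-- ===== PORT B =====
-- B's rolling DP, right-to-left over the list: returns (dp[idx], dp[idx+1]) for the suffix starting at idx.
def bDP (i : Int) : List Int → Int × Int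
  | [] => (0, 0)
  | x :: rest =>
    let p := bDP i rest
    match rest with
    | y :: _ =>
      (if x ≠ y ∧ (x = i ∨ y = i) then max p.1 (2 + p.2) else p.1, p.1)
    | [] => (0, 0)

def solution_alt (a : List Int) : Int :=
  let counter := PySem.Dict.counter a
  counter.keys.foldl
    (fun answer i =>
      if counter.getD i 0 * 2 ≤ answer then answer
      else max (bDP i a).1 answer)
    (-1)

-- ===== PRECONDITION & SPEC =====
def Spec_solution (a : List Int) (out : Int) : Prop := out = solution_alt a
instance (a : List Int) (out : Int) : Decidable (Spec_solution a out) := by unfold Spec_solution; infer_instance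

-- ===== CLAIM (what is proved, stated in full; the proofs are below) =====
def Claim_equal_solution : Prop := ∀ (a : List Int), Dom_solution a → Spec_solution a (solution a)

-- ===== LEMMAS AND PROOFS =====

-- greedy matching as structural recursion on the list
def greedy (i : Int) : List Int → Int
  | x :: y :: rest =>
    if x ≠ y ∧ (x = i ∨ y = i) then 2 + greedy i rest else greedy i (y :: rest)
  | _ => 0

-- monotonicity / boundedness of the greedy count (mutual, by length)
theorem greedy_mono_bound (i : Int) : ∀ l : List Int,
    (∀ x, greedy i l ≤ greedy i (x :: l)) ∧ (∀ x, greedy i (x :: l) ≤ 2 + greedy i l) := by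
  intro l
  induction hn : l.length using Nat.strong_induction_on generalizing l with
  | _ n IH =>
    subst hn
    have ih : ∀ r : List Int, r.length < l.length →
        (∀ x, greedy i r ≤ greedy i (x :: r)) ∧ (∀ x, greedy i (x :: r) ≤ 2 + greedy i r) :=
      fun r hr => IH r.length hr r rfl
    constructor
    · intro x
      match l with
      | [] => simp [greedy]
      | y :: r =>
        by_cases h : x ≠ y ∧ (x = i ∨ y = i)
        · have h2 := (ih r (by simp)).2 y
          simp only [greedy, if_pos h]
          omega
        · simp [greedy, if_neg h]
    · intro x
      match l with
      | [] => simp [greedy]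
      | y :: r =>
        by_cases h : x ≠ y ∧ (x = i ∨ y = i)
        · have h1 := (ih r (by simp)).1 y
          simp only [greedy, if_pos h]
          omega
        · have h2 : greedy i (y :: r) ≤ 2 + greedy i r := by
            match r with
            | [] => simp [greedy]
            | z :: r' =>
              by_cases hz : y ≠ z ∧ (y = i ∨ z = i)
              · have := (ih r' (by simp)).1 z
                simp only [greedy, if_pos hz]
                omega
              · have := (ih (z :: r') (by simp)).2 y
                simpa [greedy, if_neg hz] using this
          simpa [greedy, if_neg h] using h2

theorem bDP_cons2 (i x y : Int) (rest : List Int) :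
    bDP i (x :: y :: rest) =
      (if x ≠ y ∧ (x = i ∨ y = i) then max (bDP i (y :: rest)).1 (2 + (bDP i (y :: rest)).2)
       else (bDP i (y :: rest)).1, (bDP i (y :: rest)).1) := rfl

theorem bDP_snd (i : Int) (x : Int) (rest : List Int) :
    (bDP i (x :: rest)).2 = (bDP i rest).1 := by
  match rest with
  | [] => simp [bDP]
  | y :: r => simp [bDP]

theorem bDP_fst (i : Int) : ∀ l : List Int, (bDP i l).1 = greedy i l := by
  intro l
  induction hn : l.length using Nat.strong_induction_on generalizing l with
  | _ n IH =>
    subst hn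
    have ih : ∀ r : List Int, r.length < l.length → (bDP i r).1 = greedy i r :=
      fun r hr => IH r.length hr r rfl
    match l with
    | [] => simp [bDP, greedy]
    | [x] => simp [bDP, greedy]
    | x :: y :: rest =>
      have h1 : (bDP i (y :: rest)).1 = greedy i (y :: rest) := ih _ (by simp)
      have h2 : (bDP i (y :: rest)).2 = greedy i rest := by
        rw [bDP_snd]; exact ih _ (by simp)
      rw [bDP_cons2]
      by_cases h : x ≠ y ∧ (x = i ∨ y = i)
      · have hle : greedy i (y :: rest) ≤ 2 + greedy i rest :=
          (greedy_mono_bound i rest).2 y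
        simp only [greedy, if_pos h, h1, h2]
        omega
      · simp only [greedy, if_neg h, h1]

theorem aLoop_eq (a : List Int) (i : Int) : ∀ idx cnt,
    aLoop a i idx cnt = cnt + greedy i (a.drop idx) := by
  intro idx
  induction hn : a.length - idx using Nat.strong_induction_on generalizing idx with
  | _ n ih =>
    intro cnt
    by_cases h : idx + 1 < a.length
    · have hidx : idx < a.length := by omega
      have hidx1 : idx + 1 < a.length := h
      have hdrop : a.drop idx = a[idx] :: a[idx + 1] :: a.drop (idx + 2) := by
        rw [List.drop_eq_getElem_cons hidx, List.drop_eq_getElem_cons hidx1]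
      have hg0 : PySem.List.pyGetD a (idx : Nat) 0 = a[idx] := by
        simp [PySem.List.pyGetD_natCast, List.getElem?_eq_getElem hidx]
      have hg1 : PySem.List.pyGetD a ((idx + 1 : Nat) : Nat) 0 = a[idx + 1] := by
        rw [PySem.List.pyGetD_natCast]; exact List.getD_eq_getElem a 0 hidx1
      rw [aLoop, if_pos h]
      by_cases hc : a[idx] ≠ a[idx + 1] ∧ (a[idx] = i ∨ a[idx + 1] = i)
      · rw [if_pos (by rw [hg0, hg1]; exact hc)]
        rw [ih (a.length - (idx + 2)) (by omega) (idx + 2) rfl (cnt + 2)]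
        rw [hdrop]
        simp only [greedy, if_pos hc]
        omega
      · rw [if_neg (by rw [hg0, hg1]; exact hc)]
        rw [ih (a.length - (idx + 1)) (by omega) (idx + 1) rfl cnt]
        rw [hdrop, List.drop_eq_getElem_cons hidx1]
        simp only [greedy, if_neg hc]
    · rw [aLoop, if_neg h]
      have : a.drop idx = [] ∨ ∃ x, a.drop idx = [x] := by
        match hd : a.drop idx with
        | [] => exact Or.inl rfl
        | [x] => exact Or.inr ⟨x, rfl⟩
        | x :: y :: r =>
          exfalso
          have := List.length_drop (l := a) (i := idx)
          rw [hd] at this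
          simp at this
          omega
      rcases this with hd | ⟨x, hd⟩ <;> simp [hd, greedy]

-- ===== VERDICT (by name: the statement is the Claim_ definition above) =====
theorem solution_spec : Claim_equal_solution := by
  intro a _
  unfold Spec_solution solution solution_alt
  have key : ∀ i : Int, aLoop a i 0 0 = (bDP i a).1 := by
    intro i
    rw [aLoop_eq a i 0 0, bDP_fst]
    simp
  simp only [key]
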